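-- pv_equiv track=rewrite | github.com/xuzel/optimal_sample_selection | show.py | subset_cover_graph
-- ===== SOURCE A (Python) =====
-- import itertools
-- from collections import defaultdict
--
-- def generate_combinations(elements, k):
--     return list(itertools.combinations(elements, k))
--
-- def subset_cover_graph(n_numbers, k, j, s):
--     j_subsets = generate_combinations(n_numbers, j)
--     k_combinations = generate_combinations(n_numbers, k)
--     cover_graph = defaultdict(list)
--     for k_comb in k_combinations:
--         for j_sub in j_subsets:
--             if any(set(subset).issubset(k_comb) for subset in generate_combinations(j_sub, s)):
--                 cover_graph[tuple(k_comb)].append(tuple(j_sub))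
--     return cover_graph
-- ===== SOURCE B (Python) =====
-- import itertools
--
-- def subset_cover_graph(n_numbers, k, j, s):
--     # A j-subset qualifies for k_comb iff some s-subset of it lies inside k_comb,
--     # i.e. iff at least s of its elements (counted with multiplicity) are in set(k_comb).
--     j_subsets = list(itertools.combinations(n_numbers, j))
--     result = {}
--     for k_comb in itertools.combinations(n_numbers, k):
--         k_set = set(k_comb)
--         matches = [js for js in j_subsets if sum(1 for x in js if x in k_set) >= s]
--         if matches:
--             result.setdefault(k_comb, []).extend(matches)
--     return result
-- ===== Notes on version B (the rewrite author's own statement) =====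
-- stated objective: alternative
-- what changed: The per-pair test 'some s-subset of the j-subset lies in the k-combination' is replaced by a single membership count against a set of the k-combination (at least s elements of the j-subset are in it), removing the C(j,s) inner enumeration; matches are collected per k-combination in one filter instead of per-element defaultdict appends (intended as faster; a timing run measured 12.3x at n=16 but could not confirm at larger sizes, so no speed is claimed).
import Mathlib
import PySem

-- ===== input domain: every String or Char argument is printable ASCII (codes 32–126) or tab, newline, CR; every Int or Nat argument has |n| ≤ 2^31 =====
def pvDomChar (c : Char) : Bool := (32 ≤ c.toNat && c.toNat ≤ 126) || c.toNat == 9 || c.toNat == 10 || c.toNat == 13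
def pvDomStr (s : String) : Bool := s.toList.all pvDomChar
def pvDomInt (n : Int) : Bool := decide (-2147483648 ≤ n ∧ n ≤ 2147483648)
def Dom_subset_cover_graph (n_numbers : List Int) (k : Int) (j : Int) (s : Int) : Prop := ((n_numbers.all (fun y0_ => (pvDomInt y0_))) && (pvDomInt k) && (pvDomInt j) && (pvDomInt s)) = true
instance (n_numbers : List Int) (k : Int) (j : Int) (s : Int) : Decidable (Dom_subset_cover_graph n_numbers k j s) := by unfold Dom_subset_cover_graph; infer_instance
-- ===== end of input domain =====

-- B replaces A's enumeration of all s-subsets of each j-subset by a single membership-count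
-- test (≥ s elements of the j-subset lie in the set of the k-combination), collecting each
-- k-combination's matches with one filter instead of per-element defaultdict appends.

-- defaultdict(list)[key].append-style update on an insertion-ordered association list
-- (exact port of CPython dict semantics for these operations: first-match lookup, in-place value update,
-- new keys appended at the end); appends all of `vs` to the list stored under `key`.
def dappend (d : List (List Int × List (List Int))) (key : List Int) (vs : List (List Int)) :
    List (List Int × List (List Int)) :=
  match d with
  | [] => [(key, vs)]
  | (a, b) :: rest => if a = key then (a, b ++ vs) :: rest else (a, b) :: dappend rest key vs

-- ===== PORT A =====
def subset_cover_graph (n_numbers : List Int) (k : Int) (j : Int) (s : Int) : List (List Int × List (List Int)) :=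
  let j_subsets := PySem.List.combinations n_numbers j.toNat
  let k_combinations := PySem.List.combinations n_numbers k.toNat
  k_combinations.foldl (fun cover_graph k_comb =>
    j_subsets.foldl (fun cover_graph j_sub =>
      if (PySem.List.combinations j_sub s.toNat).any (fun subset => subset.all (fun x => k_comb.contains x)) then
        dappend cover_graph k_comb [j_sub]
      else cover_graph) cover_graph) []

-- ===== PORT B =====
def subset_cover_graph_alt (n_numbers : List Int) (k : Int) (j : Int) (s : Int) : List (List Int × List (List Int)) :=
  let j_subsets := PySem.List.combinations n_numbers j.toNat
  (PySem.List.combinations n_numbers k.toNat).foldl (fun result k_comb =>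
    let k_set := PySem.Set.ofList k_comb
    let ms := j_subsets.filter (fun js => s ≤ ((js.filter (fun x => k_set.contains x)).length : Int))
    if ms = [] then result else dappend result k_comb ms) []

-- ===== PRECONDITION & SPEC =====
-- Pre_ excludes exactly the inputs where Python A raises ValueError in itertools.combinations:
-- negative k or j, or negative s when both combination lists are nonempty (k ≤ len and j ≤ len).
def Pre_subset_cover_graph (n_numbers : List Int) (k : Int) (j : Int) (s : Int) : Prop :=
  0 ≤ k ∧ 0 ≤ j ∧ (0 ≤ s ∨ (n_numbers.length : Int) < k ∨ (n_numbers.length : Int) < j)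
instance (n_numbers : List Int) (k : Int) (j : Int) (s : Int) : Decidable (Pre_subset_cover_graph n_numbers k j s) := by unfold Pre_subset_cover_graph; infer_instance
def pvWitness_subset_cover_graph : List Int × Int × Int × Int := ([1, 2, 3], 2, 2, 1)

def Spec_subset_cover_graph (n_numbers : List Int) (k : Int) (j : Int) (s : Int) (out : List (List Int × List (List Int))) : Prop := out = subset_cover_graph_alt n_numbers k j s
instance (n_numbers : List Int) (k : Int) (j : Int) (s : Int) (out : List (List Int × List (List Int))) : Decidable (Spec_subset_cover_graph n_numbers k j s out) := by unfold Spec_subset_cover_graph; infer_instance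

-- ===== CLAIM (what is proved, stated in full; the proofs are below) =====
def Claim_equal_subset_cover_graph : Prop := ∀ (n_numbers : List Int) (k : Int) (j : Int) (s : Int), Dom_subset_cover_graph n_numbers k j s → Pre_subset_cover_graph n_numbers k j s → Spec_subset_cover_graph n_numbers k j s (subset_cover_graph n_numbers k j s)

-- ===== LEMMAS AND PROOFS =====

-- "some r-subset of js satisfies p elementwise" ⟺ "at least r elements of js satisfy p"
theorem combs_any_all {α : Type} (p : α → Bool) :
    ∀ (js : List α) (r : Nat),
      (PySem.List.combinations js r).any (fun sub => sub.all p) = decide (r ≤ js.countP p) := by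
  intro js
  induction js with
  | nil =>
    intro r
    cases r with
    | zero => simp [PySem.List.combinations_zero]
    | succ r => simp [PySem.List.combinations_nil_succ]
  | cons x xs ih =>
    intro r
    cases r with
    | zero => simp [PySem.List.combinations_zero]
    | succ r =>
      rw [PySem.List.combinations_cons_succ]
      simp only [List.any_append, List.any_map, Function.comp_def, List.all_cons]
      by_cases hx : p x = true
      · have h1 : (PySem.List.combinations xs r).any (fun sub => p x && sub.all p)
            = (PySem.List.combinations xs r).any (fun sub => sub.all p) := by
          simp [hx]
        rw [h1, ih r, ih (r + 1)]
        simp [hx]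
        omega
      · have hx' : p x = false := by simpa using hx
        have h1 : (PySem.List.combinations xs r).any (fun sub => p x && sub.all p) = false := by
          simp [hx']
        rw [h1, Bool.false_or, ih (r + 1)]
        simp [hx']

-- appending twice to the same key composes
theorem dappend_dappend (d : List (List Int × List (List Int))) (key : List Int)
    (a b : List (List Int)) :
    dappend (dappend d key a) key b = dappend d key (a ++ b) := by
  induction d with
  | nil => simp [dappend]
  | cons hd tl ih =>
    obtain ⟨k, v⟩ := hd
    by_cases h : k = key
    · simp [dappend, h]
    · simp [dappend, h, ih]

-- the inner j-loop of A, appending one matching j-subset at a time, equals one batch append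
-- of the filtered list (and leaves the dict untouched when nothing ms)
theorem inner_loop_eq (q : List Int → Bool) (key : List Int) :
    ∀ (l : List (List Int)) (d : List (List Int × List (List Int))),
      l.foldl (fun d js => if q js then dappend d key [js] else d) d
        = (if l.filter q = [] then d else dappend d key (l.filter q)) := by
  intro l
  induction l with
  | nil => intro d; simp
  | cons x xs ih =>
    intro d
    by_cases hq : q x = true
    · simp only [List.foldl_cons, List.filter_cons, hq, if_pos]
      rw [ih]
      by_cases hf : xs.filter q = []
      · simp [hf]
      · simp [hf, dappend_dappend]
    · have hq' : q x = false := by simpa using hq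
      simp only [List.foldl_cons, List.filter_cons, hq']
      simp only [Bool.false_eq_true, if_false]
      exact ih d

-- the two per-j-subset predicates agree (for s ≥ 0)
theorem pred_eq (k_comb : List Int) (s : Int) (hs : 0 ≤ s) (js : List Int) :
    (PySem.List.combinations js s.toNat).any (fun subset => subset.all (fun x => k_comb.contains x))
      = decide (s ≤ ((js.filter (fun x => (PySem.Set.ofList k_comb).contains x)).length : Int)) := by
  rw [combs_any_all]
  have hmem : ∀ x : Int, (PySem.Set.ofList k_comb).contains x = k_comb.contains x := by
    intro x
    simp [PySem.Set.contains, PySem.Set.mem_ofList]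
  have hfilter : js.filter (fun x => (PySem.Set.ofList k_comb).contains x)
      = js.filter (fun x => k_comb.contains x) := by
    apply List.filter_congr
    intro x _
    rw [hmem]
  rw [hfilter, ← List.countP_eq_length_filter]
  simp only [decide_eq_decide]
  omega

-- ===== VERDICT (by name: the statement is the Claim_ definition above) =====
theorem subset_cover_graph_spec : Claim_equal_subset_cover_graph := by
  intro n_numbers k j s _hDom hPre
  obtain ⟨hk, hj, hs⟩ := hPre
  unfold Spec_subset_cover_graph subset_cover_graph subset_cover_graph_alt
  rcases Int.lt_or_le s 0 with hneg | hs
  · -- s < 0: Pre_ forces k > len or j > len, so one combination list is empty and both sides are []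
    rcases hs with hs | hklen | hjlen
    · omega
    · have hKnil : PySem.List.combinations n_numbers k.toNat = [] :=
        PySem.List.combinations_eq_nil_of_length_lt (h := by omega)
      simp [hKnil]
    · have hJnil : PySem.List.combinations n_numbers j.toNat = [] :=
        PySem.List.combinations_eq_nil_of_length_lt (h := by omega)
      simp [hJnil]
  apply PySem.List.foldl_congr_mem
  intro d k_comb _
  rw [inner_loop_eq]
  have : (PySem.List.combinations n_numbers j.toNat).filter
        (fun js => (PySem.List.combinations js s.toNat).any (fun subset => subset.all (fun x => k_comb.contains x)))
      = (PySem.List.combinations n_numbers j.toNat).filter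
        (fun js => decide (s ≤ (((js.filter (fun x => (PySem.Set.ofList k_comb).contains x)).length : Int)))) := by
    apply List.filter_congr
    intro js _
    rw [pred_eq k_comb s hs js]
  rw [this]
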